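-- pv_equiv track=rewrite | github.com/khm9888/projects | personal_project/2020/practice/20200214_백준테스트.py | people
-- ===== SOURCE A (Python) =====
-- apart={}
--
-- def people(floor,room):
--     if (floor,room) in apart.keys():
--         return apart[floor,room]
--     else:
--         sum=0
--         if floor==0:#0층의 경우
--             sum=room
--         else:#아닌경우
--             for i in range(1,room+1):
--                 sum+=people(floor-1,i)
--         apart[floor,room]=sum
--         return sum
-- ===== SOURCE B (Python) =====
-- def people(floor, room):
--     if floor == 0:
--         return room
--     if room <= 0:
--         return 0
--     # C(room + floor, floor + 1) via the multiplicative formula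
--     c = 1
--     for i in range(1, floor + 2):
--         c = c * (room - 1 + i) // i
--     return c
-- ===== Notes on version B (the rewrite author's own statement) =====
-- stated objective: faster
-- what changed: Replaced the memoized double recursion (sum over rooms of the floor below) by the closed-form binomial coefficient C(room+floor, floor+1) computed with the multiplicative formula in one O(floor) loop.
import Mathlib
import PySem

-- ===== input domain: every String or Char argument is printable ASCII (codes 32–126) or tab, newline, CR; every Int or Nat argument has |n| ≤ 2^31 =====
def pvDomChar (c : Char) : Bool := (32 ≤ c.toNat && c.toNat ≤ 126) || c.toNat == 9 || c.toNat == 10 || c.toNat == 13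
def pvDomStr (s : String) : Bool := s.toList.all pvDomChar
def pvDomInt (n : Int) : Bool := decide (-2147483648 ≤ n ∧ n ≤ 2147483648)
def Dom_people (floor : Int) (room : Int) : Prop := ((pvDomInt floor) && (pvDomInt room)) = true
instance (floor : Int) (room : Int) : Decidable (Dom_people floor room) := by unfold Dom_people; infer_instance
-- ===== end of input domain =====

-- B replaces A's memoized double recursion by the closed-form binomial C(room+floor, floor+1),
-- computed with the multiplicative formula in one O(floor) loop.
-- A mutates the module-level memo dict 'apart' (the port threads it through the recursion; the memo
-- persisting across top-level calls does not change return values) — the equivalence proved is about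
-- the return value only.


-- ===== PORT A =====
-- A's recursion with the memo dict 'apart' threaded through as state, on a Nat copy of the
-- (nonnegative) floor index; keys are the (floor, room) pairs A uses.  A Python dict is a hash
-- map, so the memo is ported as Std.HashMap (lookup = exact key equality, as in Python).
def peopleRecA : Nat → Int → Std.HashMap (Int × Int) Int → Int × Std.HashMap (Int × Int) Int
  | f, room, apart =>
    match apart[(((f : Int), room))]? with
    | some v => (v, apart)
    | none =>
      match f with
      | 0 => (room, apart.insert (((0 : Nat) : Int), room) room)
      | g + 1 =>
        let p := (PySem.List.pyRange 1 (room + 1) 1).foldl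
          (fun p i => let r := peopleRecA g i p.2; (p.1 + r.1, r.2)) (0, apart)
        (p.1, p.2.insert (((g + 1 : Nat) : Int), room) p.1)

-- Top level of A: the 'floor == 0' branch, else the loop 'for i in range(1, room+1)' summing
-- people(floor-1, i).  For floor < 0 this loop is empty iff room ≤ 0 (then A returns 0, as here);
-- with room ≥ 1 the Python A never terminates — those inputs are outside Pre_people.
def people (floor : Int) (room : Int) : Int :=
  if floor = 0 then room
  else ((PySem.List.pyRange 1 (room + 1) 1).foldl
        (fun p i => let r := peopleRecA (floor - 1).toNat i p.2; (p.1 + r.1, r.2))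
        ((0 : Int), (∅ : Std.HashMap (Int × Int) Int))).1

-- ===== PORT B =====
def people_alt (floor : Int) (room : Int) : Int :=
  if floor = 0 then room
  else if room ≤ 0 then 0
  else (PySem.List.pyRange 1 (floor + 2) 1).foldl
        (fun c i => PySem.Int.floordiv (c * (room - 1 + i)) i) 1

-- ===== PRECONDITION & SPEC =====
-- Pre_ excludes exactly the inputs on which the Python A recurses without end (RecursionError):
-- floor < 0 together with room ≥ 1.
def Pre_people (floor : Int) (room : Int) : Prop := 0 ≤ floor ∨ room ≤ 0
instance (floor : Int) (room : Int) : Decidable (Pre_people floor room) := by unfold Pre_people; infer_instance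
def pvWitness_people : Int × Int := (3, 4)

def Spec_people (floor : Int) (room : Int) (out : Int) : Prop := out = people_alt floor room
instance (floor : Int) (room : Int) (out : Int) : Decidable (Spec_people floor room out) := by unfold Spec_people; infer_instance

-- ===== CLAIM (what is proved, stated in full; the proofs are below) =====
def Claim_equal_people : Prop := ∀ (floor : Int) (room : Int), Dom_people floor room → Pre_people floor room → Spec_people floor room (people floor room)

-- ===== LEMMAS AND PROOFS =====

-- The closed form both sides reach: C((room+f).toNat, f+1) as an Int.
def chooseZ (room : Int) (f : Nat) : Int := ((room + f).toNat.choose (f + 1) : Int)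

-- The value A's recursion computes at floor f, room r.
def pSpec : Nat → Int → Int
  | 0, r => r
  | g + 1, r => chooseZ r (g + 1)

-- Memo-dict invariant: every cached entry holds the correct value.
def InvA (d : Std.HashMap (Int × Int) Int) : Prop :=
  ∀ (k : Int × Int) (v : Int), d[k]? = some v → ∃ f : Nat, k.1 = (f : Int) ∧ v = pSpec f k.2

lemma chooseZ_nonpos {room : Int} (f : Nat) (h : room ≤ 0) : chooseZ room f = 0 := by
  unfold chooseZ
  rw [Nat.choose_eq_zero_of_lt (by omega)]
  simp

-- Hockey-stick: Σ_{i=1}^{room} C(i+f, f+1) = C(room+f+1, f+2), as the fold A performs.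
lemma hockey (f : Nat) (room : Int) :
    (PySem.List.pyRange 1 (room + 1) 1).foldl (fun s i => s + chooseZ i f) 0
      = chooseZ room (f + 1) := by
  rcases le_or_gt room 0 with h | h
  · rw [PySem.List.pyRange_one_eq_nil (by omega), chooseZ_nonpos _ h]
    rfl
  · obtain ⟨n, hn⟩ : ∃ n : Nat, room = (n : Int) + 1 := ⟨(room - 1).toNat, by omega⟩
    subst hn
    induction n with
    | zero =>
      rw [show ((0 : Nat) : Int) + 1 + 1 = 1 + 1 by ring, PySem.List.pyRange_one_singleton]
      unfold chooseZ
      simp only [List.foldl, zero_add]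
      rw [show ((1 : Int) + (f : Int)).toNat = f + 1 by omega,
          show (((0 : Nat) : Int) + 1 + ((f + 1 : Nat) : Int)).toNat = f + 2 by omega,
          Nat.choose_self, Nat.choose_self]
    | succ m ih =>
      rw [show ((m + 1 : Nat) : Int) + 1 + 1 = (((m : Nat) : Int) + 1 + 1) + 1 by push_cast; ring,
          PySem.List.pyRange_one_succ_right (by omega), List.foldl_append,
          ih (by omega)]
      simp only [List.foldl]
      unfold chooseZ
      rw [show (((m : Nat) : Int) + 1 + ((f + 1 : Nat) : Int)).toNat = m + f + 2 by omega,
          show (((m : Nat) : Int) + 1 + 1 + (f : Int)).toNat = m + f + 2 by omega,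
          show (((m + 1 : Nat) : Int) + 1 + ((f + 1 : Nat) : Int)).toNat = (m + f + 2) + 1 by omega,
          Nat.choose_succ_succ (m + f + 2) (f + 1)]
      push_cast
      ring

-- Σ_{i=1}^{room} pSpec g i = chooseZ room (g+1), as a fold.
lemma pSpec_sum (g : Nat) (room : Int) :
    (PySem.List.pyRange 1 (room + 1) 1).foldl (fun s i => s + pSpec g i) 0
      = chooseZ room (g + 1) := by
  cases g with
  | zero =>
    rw [← hockey 0 room]
    apply PySem.List.foldl_congr_mem
    intro s i hi
    have hi' := (PySem.List.mem_pyRange_one).1 hi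
    simp only [pSpec]
    unfold chooseZ
    rw [Nat.choose_one_right]
    omega
  | succ g' =>
    rw [← hockey (g' + 1) room]
    apply PySem.List.foldl_congr_mem
    intro s i _
    rfl

lemma InvA_insert {d : Std.HashMap (Int × Int) Int} (hd : InvA d) (f : Nat) (r : Int) :
    InvA (d.insert ((f : Int), r) (pSpec f r)) := by
  intro k v hk
  rw [Std.HashMap.getElem?_insert] at hk
  split_ifs at hk with hkk
  · obtain rfl : ((f : Int), r) = k := beq_iff_eq.1 hkk
    exact ⟨f, rfl, (Option.some.inj hk).symm⟩
  · exact hd k v hk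

-- The inner summing fold preserves the invariant and accumulates pSpec values.
lemma foldA (g : Nat)
    (hg : ∀ r d, InvA d → (peopleRecA g r d).1 = pSpec g r ∧ InvA (peopleRecA g r d).2) :
    ∀ (l : List Int) (acc : Int) (d : Std.HashMap (Int × Int) Int), InvA d →
      (l.foldl (fun p i => let r := peopleRecA g i p.2; (p.1 + r.1, r.2)) (acc, d)).1
        = l.foldl (fun s i => s + pSpec g i) acc
      ∧ InvA (l.foldl (fun p i => let r := peopleRecA g i p.2; (p.1 + r.1, r.2)) (acc, d)).2 := by
  intro l
  induction l with
  | nil => intro acc d hd; exact ⟨rfl, hd⟩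
  | cons i l ih =>
    intro acc d hd
    obtain ⟨hv, hd'⟩ := hg i d hd
    simpa [List.foldl, hv] using ih (acc + pSpec g i) (peopleRecA g i d).2 hd'

-- A's recursion computes pSpec and keeps the memo correct.
lemma peopleRecA_correct : ∀ (f : Nat) (r : Int) (d : Std.HashMap (Int × Int) Int), InvA d →
    (peopleRecA f r d).1 = pSpec f r ∧ InvA (peopleRecA f r d).2 := by
  intro f
  induction f with
  | zero =>
    intro r d hd
    rw [peopleRecA]
    cases hget : d[((((0 : Nat) : Int), r))]? with
    | some v =>
      obtain ⟨f', hf', hv⟩ := hd _ _ hget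
      have h2 : (((0 : Nat) : Int)) = (f' : Int) := hf'
      have : f' = 0 := by exact_mod_cast h2.symm
      subst this
      exact ⟨hv, hd⟩
    | none =>
      exact ⟨rfl, InvA_insert hd 0 r⟩
  | succ g ih =>
    intro r d hd
    rw [peopleRecA]
    cases hget : d[((((g + 1 : Nat) : Int), r))]? with
    | some v =>
      obtain ⟨f', hf', hv⟩ := hd _ _ hget
      have h2 : (((g + 1 : Nat) : Int)) = (f' : Int) := hf'
      have : f' = g + 1 := by exact_mod_cast h2.symm
      subst this
      exact ⟨hv, hd⟩
    | none =>
      obtain ⟨h1, h2⟩ := foldA g ih (PySem.List.pyRange 1 (r + 1) 1) 0 d hd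
      refine ⟨?_, ?_⟩
      · simp only [h1, pSpec]
        exact pSpec_sum g r
      · have := InvA_insert h2 (g + 1) r
        simp only [h1, pSpec_sum g r] at this ⊢
        exact this

lemma InvA_empty : InvA (∅ : Std.HashMap (Int × Int) Int) := by
  intro k v hk
  simp at hk

-- B-side invariant: the multiplicative loop up to i = k yields C(room-1+k, k).
lemma alt_fold_eq (room : Int) (hr : 1 ≤ room) (k : Nat) :
    (PySem.List.pyRange 1 ((k : Int) + 1) 1).foldl
        (fun c i => PySem.Int.floordiv (c * (room - 1 + i)) i) 1
      = (((room - 1 + k).toNat).choose k : Int) := by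
  induction k with
  | zero =>
    rw [PySem.List.pyRange_one_eq_nil (by omega)]
    simp
  | succ m ih =>
    rw [show ((m + 1 : Nat) : Int) + 1 = ((m : Int) + 1) + 1 by push_cast; ring,
        PySem.List.pyRange_one_succ_right (by omega), List.foldl_append, ih]
    simp only [List.foldl]
    set M : Nat := (room - 1 + m).toNat with hM
    have hroom : room - 1 + ((m : Int) + 1) = ((M + 1 : Nat) : Int) := by omega
    have hnext : (room - 1 + ((m + 1 : Nat) : Int)).toNat = M + 1 := by omega
    rw [hroom, hnext]
    have hmul : (M.choose m) * (M + 1) = (M + 1).choose (m + 1) * (m + 1) := by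
      rw [mul_comm]; exact Nat.add_one_mul_choose_eq M m
    have hcast : ((M.choose m : Int)) * ((M + 1 : Nat) : Int) = (((M.choose m) * (M + 1) : Nat) : Int) := by
      push_cast; ring
    rw [hcast, hmul, show ((m : Int) + 1) = ((m + 1 : Nat) : Int) by push_cast; ring,
        PySem.Int.floordiv_natCast, Nat.mul_div_cancel _ (Nat.succ_pos m)]

-- ===== VERDICT (by name: the statement is the Claim_ definition above) =====
theorem people_spec : Claim_equal_people := by
  intro floor room _ hpre
  unfold Spec_people people people_alt
  rcases eq_or_ne floor 0 with hf0 | hf0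
  · simp [hf0]
  · rw [if_neg hf0, if_neg hf0]
    rcases le_or_gt room 0 with hr | hr
    · rw [if_pos hr, PySem.List.pyRange_one_eq_nil (by omega)]
      rfl
    · rw [if_neg (by omega)]
      have hf1 : 1 ≤ floor := by rcases hpre with h | h; omega; omega
      obtain ⟨g, hg⟩ : ∃ g : Nat, floor - 1 = (g : Int) := ⟨(floor - 1).toNat, by omega⟩
      have hgt : (floor - 1).toNat = g := by omega
      rw [hgt]
      have hA := (foldA g (peopleRecA_correct g) (PySem.List.pyRange 1 (room + 1) 1) 0
        (∅ : Std.HashMap (Int × Int) Int) InvA_empty).1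
      rw [hA, pSpec_sum g room]
      have hB := alt_fold_eq room (by omega) (g + 2)
      rw [show floor + 2 = ((g + 2 : Nat) : Int) + 1 by push_cast; omega, hB]
      unfold chooseZ
      congr 2
      omega
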